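-- pv_equiv track=rewrite | github.com/EarthsOnline/Turbowarp-Font-Printer | TTF2Png/TTF2Png.py | classify_unicode
-- ===== SOURCE A (Python) =====
-- def classify_unicode(decimal_unicode):
--     """将Unicode字符分类 - 改进版本"""
--     chinese_chars = []
--     english_chars = []
--     digit_chars = []
--     symbol_chars = []
--
--     for code in decimal_unicode:
--         char = chr(code)
--
--         # 中文字符 (包括CJK统一表意文字和扩展)
--         if (0x4E00 <= code <= 0x9FFF or  # CJK统一表意文字
--                 0x3400 <= code <= 0x4DBF or  # CJK扩展A
--                 0x20000 <= code <= 0x2A6DF or  # CJK扩展B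
--                 0x2A700 <= code <= 0x2B73F or  # CJK扩展C
--                 0x2B740 <= code <= 0x2B81F or  # CJK扩展D
--                 0x2B820 <= code <= 0x2CEAF or  # CJK扩展E
--                 0xF900 <= code <= 0xFAFF or  # CJK兼容象形文字
--                 0x2F800 <= code <= 0x2FA1F):  # CJK兼容补充
--             chinese_chars.append(code)
--
--         # 英文字母 - 扩展范围
--         elif (0x0041 <= code <= 0x005A or  # 大写字母 A-Z
--               0x0061 <= code <= 0x007A or  # 小写字母 a-z
--               0x00C0 <= code <= 0x00FF or  # 带重音符号的拉丁字母
--               0x0100 <= code <= 0x017F or  # 拉丁扩展-A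
--               0x0180 <= code <= 0x024F):  # 拉丁扩展-B
--             english_chars.append(code)
--
--         # 数字
--         elif 0x0030 <= code <= 0x0039:
--             digit_chars.append(code)
--
--         # 符号 (更全面的排除控制字符)
--         elif (code >= 0x0020 and code <= 0x007E) or (code >= 0x00A0 and code <= 0x00BF) or \
--                 (code >= 0x2000 and code <= 0x206F):  # 一般标点符号
--             # 排除控制字符
--             if code not in [0x007F, 0x0080, 0x0081, 0x0082, 0x0083, 0x0084, 0x0085, 0x0086, 0x0087,
--                             0x0088, 0x0089, 0x008A, 0x008B, 0x008C, 0x008D, 0x008E, 0x008F, 0x0090,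
--                             0x0091, 0x0092, 0x0093, 0x0094, 0x0095, 0x0096, 0x0097, 0x0098, 0x0099,
--                             0x009A, 0x009B, 0x009C, 0x009D, 0x009E, 0x009F]:
--                 symbol_chars.append(code)
--
--     return chinese_chars, english_chars, digit_chars, symbol_chars
-- ===== SOURCE B (Python) =====
-- # A's overlapping priority ranges resolved offline into one sorted list of
-- # pairwise-disjoint intervals; each code is classified by binary search.
-- # Buckets: 0=chinese, 1=english, 2=digit, 3=symbol.
-- _PARTITION = [
--     (0x20, 0x2F, 3), (0x30, 0x39, 2), (0x3A, 0x40, 3), (0x41, 0x5A, 1),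
--     (0x5B, 0x60, 3), (0x61, 0x7A, 1), (0x7B, 0x7E, 3),
--     (0xA0, 0xBF, 3), (0xC0, 0xFF, 1), (0x100, 0x24F, 1),
--     (0x2000, 0x206F, 3),
--     (0x3400, 0x4DBF, 0), (0x4E00, 0x9FFF, 0), (0xF900, 0xFAFF, 0),
--     (0x20000, 0x2A6DF, 0), (0x2A700, 0x2B73F, 0), (0x2B740, 0x2CEAF, 0),
--     (0x2F800, 0x2FA1F, 0),
-- ]
--
-- def _find(tbl, code):
--     if not tbl:
--         return None
--     mid = len(tbl) // 2
--     lo, hi, b = tbl[mid]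
--     if code < lo:
--         return _find(tbl[:mid], code)
--     if code > hi:
--         return _find(tbl[mid + 1:], code)
--     return b
--
-- def classify_unicode(decimal_unicode):
--     out = ([], [], [], [])
--     for code in decimal_unicode:
--         b = _find(_PARTITION, code)
--         if b is not None:
--             out[b].append(code)
--     return out
-- ===== Notes on version B (the rewrite author's own statement) =====
-- stated objective: alternative
-- what changed: B resolves A's overlapping first-match priority ranges offline into one sorted list of 18 pairwise-disjoint intervals (digits/latin carved out of the symbol range, contiguous ranges merged, the dead 0x7F-0x9F exclusion list dropped) and classifies each code by recursive binary search over that partition instead of A's sequential if/elif range chain; B also omits A's unused chr(code) call, whose only effect is the ValueError excluded by Pre_.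
-- outside the precondition, e.g. on classify_unicode([-1]): A raises ValueError, B returns ([], [], [], [])
import Mathlib
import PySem

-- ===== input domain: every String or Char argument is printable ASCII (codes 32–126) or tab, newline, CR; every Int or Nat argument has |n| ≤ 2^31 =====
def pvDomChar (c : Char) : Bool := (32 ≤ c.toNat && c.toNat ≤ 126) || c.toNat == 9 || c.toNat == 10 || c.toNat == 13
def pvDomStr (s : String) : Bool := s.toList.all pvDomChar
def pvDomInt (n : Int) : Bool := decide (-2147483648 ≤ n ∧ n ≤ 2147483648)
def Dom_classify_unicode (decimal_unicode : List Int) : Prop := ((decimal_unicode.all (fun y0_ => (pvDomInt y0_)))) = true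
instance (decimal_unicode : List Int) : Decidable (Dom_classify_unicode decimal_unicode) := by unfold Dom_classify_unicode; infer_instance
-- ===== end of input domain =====

-- B resolves A's overlapping priority ranges into one sorted disjoint-interval partition and
-- classifies each code by recursive binary search; return values only (A's unused chr(code)
-- call raises ValueError on invalid codepoints, excluded by Pre_).

-- ===== PORT A =====
-- the chr(code) call binds an unused variable; on Pre_ it always succeeds, so it is elided here
def pvStepA (acc : List Int × List Int × List Int × List Int) (code : Int) :
    List Int × List Int × List Int × List Int :=
  let (ch, en, di, sy) := acc
  if (0x4E00 ≤ code ∧ code ≤ 0x9FFF) ∨ (0x3400 ≤ code ∧ code ≤ 0x4DBF) ∨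
     (0x20000 ≤ code ∧ code ≤ 0x2A6DF) ∨ (0x2A700 ≤ code ∧ code ≤ 0x2B73F) ∨
     (0x2B740 ≤ code ∧ code ≤ 0x2B81F) ∨ (0x2B820 ≤ code ∧ code ≤ 0x2CEAF) ∨
     (0xF900 ≤ code ∧ code ≤ 0xFAFF) ∨ (0x2F800 ≤ code ∧ code ≤ 0x2FA1F) then
    (ch ++ [code], en, di, sy)
  else if (0x41 ≤ code ∧ code ≤ 0x5A) ∨ (0x61 ≤ code ∧ code ≤ 0x7A) ∨
          (0xC0 ≤ code ∧ code ≤ 0xFF) ∨ (0x100 ≤ code ∧ code ≤ 0x17F) ∨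
          (0x180 ≤ code ∧ code ≤ 0x24F) then
    (ch, en ++ [code], di, sy)
  else if 0x30 ≤ code ∧ code ≤ 0x39 then
    (ch, en, di ++ [code], sy)
  else if (code ≥ 0x20 ∧ code ≤ 0x7E) ∨ (code ≥ 0xA0 ∧ code ≤ 0xBF) ∨
          (code ≥ 0x2000 ∧ code ≤ 0x206F) then
    if code ∉ ([0x7F, 0x80, 0x81, 0x82, 0x83, 0x84, 0x85, 0x86, 0x87,
                0x88, 0x89, 0x8A, 0x8B, 0x8C, 0x8D, 0x8E, 0x8F, 0x90,
                0x91, 0x92, 0x93, 0x94, 0x95, 0x96, 0x97, 0x98, 0x99,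
                0x9A, 0x9B, 0x9C, 0x9D, 0x9E, 0x9F] : List Int) then
      (ch, en, di, sy ++ [code])
    else (ch, en, di, sy)
  else (ch, en, di, sy)

def classify_unicode (decimal_unicode : List Int) : List Int × List Int × List Int × List Int :=
  decimal_unicode.foldl pvStepA ([], [], [], [])

-- ===== PORT B =====
def pvPartition : List (Int × Int × Int) :=
  [(0x20, 0x2F, 3), (0x30, 0x39, 2), (0x3A, 0x40, 3), (0x41, 0x5A, 1),
   (0x5B, 0x60, 3), (0x61, 0x7A, 1), (0x7B, 0x7E, 3),
   (0xA0, 0xBF, 3), (0xC0, 0xFF, 1), (0x100, 0x24F, 1),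
   (0x2000, 0x206F, 3),
   (0x3400, 0x4DBF, 0), (0x4E00, 0x9FFF, 0), (0xF900, 0xFAFF, 0),
   (0x20000, 0x2A6DF, 0), (0x2A700, 0x2B73F, 0), (0x2B740, 0x2CEAF, 0),
   (0x2F800, 0x2FA1F, 0)]

def pvFind (tbl : List (Int × Int × Int)) (code : Int) : Option Int :=
  if h : tbl = [] then none
  else
    let mid := tbl.length / 2
    let t := tbl[mid]!
    if code < t.1 then pvFind (tbl.take mid) code
    else if t.2.1 < code then pvFind (tbl.drop (mid + 1)) code
    else some t.2.2
termination_by tbl.length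
decreasing_by
  · have : tbl.length ≠ 0 := fun h0 => h (List.eq_nil_of_length_eq_zero h0)
    simp [List.length_take]; omega
  · have : tbl.length ≠ 0 := fun h0 => h (List.eq_nil_of_length_eq_zero h0)
    simp; omega

def pvStepB (acc : List Int × List Int × List Int × List Int) (code : Int) :
    List Int × List Int × List Int × List Int :=
  let (ch, en, di, sy) := acc
  match pvFind pvPartition code with
  | some 0 => (ch ++ [code], en, di, sy)
  | some 1 => (ch, en ++ [code], di, sy)
  | some 2 => (ch, en, di ++ [code], sy)
  | some _ => (ch, en, di, sy ++ [code])
  | none => (ch, en, di, sy)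

def classify_unicode_alt (decimal_unicode : List Int) : List Int × List Int × List Int × List Int :=
  decimal_unicode.foldl pvStepB ([], [], [], [])

-- ===== PRECONDITION & SPEC =====
-- Pre_ excludes exactly the inputs where A's chr(code) raises ValueError (code outside chr's range)
def Pre_classify_unicode (decimal_unicode : List Int) : Prop :=
  ∀ code ∈ decimal_unicode, 0 ≤ code ∧ code ≤ 0x10FFFF
instance (decimal_unicode : List Int) : Decidable (Pre_classify_unicode decimal_unicode) := by
  unfold Pre_classify_unicode; infer_instance
def pvWitness_classify_unicode : List Int := [65, 0x4E00, 48, 32, 0x7F, 0xA0]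

def Spec_classify_unicode (decimal_unicode : List Int) (out : List Int × List Int × List Int × List Int) : Prop := out = classify_unicode_alt decimal_unicode
instance (decimal_unicode : List Int) (out : List Int × List Int × List Int × List Int) : Decidable (Spec_classify_unicode decimal_unicode out) := by unfold Spec_classify_unicode; infer_instance

-- ===== CLAIM (what is proved, stated in full; the proofs are below) =====
def Claim_equal_classify_unicode : Prop := ∀ (decimal_unicode : List Int), Dom_classify_unicode decimal_unicode → Pre_classify_unicode decimal_unicode → Spec_classify_unicode decimal_unicode (classify_unicode decimal_unicode)

-- ===== LEMMAS AND PROOFS =====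
set_option maxHeartbeats 4000000 in
set_option maxRecDepth 10000 in
theorem pvFind_partition (code : Int) :
    pvFind pvPartition code =
      if (0x4E00 ≤ code ∧ code ≤ 0x9FFF) ∨ (0x3400 ≤ code ∧ code ≤ 0x4DBF) ∨
         (0x20000 ≤ code ∧ code ≤ 0x2A6DF) ∨ (0x2A700 ≤ code ∧ code ≤ 0x2B73F) ∨
         (0x2B740 ≤ code ∧ code ≤ 0x2B81F) ∨ (0x2B820 ≤ code ∧ code ≤ 0x2CEAF) ∨
         (0xF900 ≤ code ∧ code ≤ 0xFAFF) ∨ (0x2F800 ≤ code ∧ code ≤ 0x2FA1F) then some 0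
      else if (0x41 ≤ code ∧ code ≤ 0x5A) ∨ (0x61 ≤ code ∧ code ≤ 0x7A) ∨
              (0xC0 ≤ code ∧ code ≤ 0xFF) ∨ (0x100 ≤ code ∧ code ≤ 0x17F) ∨
              (0x180 ≤ code ∧ code ≤ 0x24F) then some 1
      else if 0x30 ≤ code ∧ code ≤ 0x39 then some 2
      else if (code ≥ 0x20 ∧ code ≤ 0x7E) ∨ (code ≥ 0xA0 ∧ code ≤ 0xBF) ∨
              (code ≥ 0x2000 ∧ code ≤ 0x206F) then some 3
      else none := by
  simp [pvFind, pvPartition]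
  split_ifs <;> first | rfl | omega

set_option maxHeartbeats 1000000 in
theorem pvMemCtrl (code : Int) :
    (code ∈ ([0x7F, 0x80, 0x81, 0x82, 0x83, 0x84, 0x85, 0x86, 0x87,
              0x88, 0x89, 0x8A, 0x8B, 0x8C, 0x8D, 0x8E, 0x8F, 0x90,
              0x91, 0x92, 0x93, 0x94, 0x95, 0x96, 0x97, 0x98, 0x99,
              0x9A, 0x9B, 0x9C, 0x9D, 0x9E, 0x9F] : List Int)) ↔
    (0x7F ≤ code ∧ code ≤ 0x9F) := by
  simp only [List.mem_cons, List.not_mem_nil, or_false]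
  omega

set_option maxHeartbeats 1000000 in
theorem pvStep_eq : pvStepA = pvStepB := by
  funext acc code
  obtain ⟨ch, en, di, sy⟩ := acc
  simp only [pvStepA, pvStepB, pvFind_partition, pvMemCtrl]
  split_ifs <;> first | rfl | omega

-- ===== VERDICT (by name: the statement is the Claim_ definition above) =====
theorem classify_unicode_spec : Claim_equal_classify_unicode := by
  intro l _ _
  unfold Spec_classify_unicode classify_unicode classify_unicode_alt
  rw [pvStep_eq]
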